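-- pv_equiv track=rewrite | github.com/yelbissa/h2o-3 | h2o-bindings/bin/gen_java.py | translate_name
-- ===== SOURCE A (Python) =====
-- from builtins import range
--
-- def translate_name(name):
--     """
--     Converts names with underscores into camelcase. For example:
--         "num_rows" => "numRows"
--         "very_long_json_name" => "veryLongJsonName"
--         "build_GBM_model" => "buildGbmModel"
--         "KEY" => "key"
--         "middle___underscores" => "middleUnderscores"
--         "_exclude_fields" => "_excludeFields" (retain initial/trailing underscores)
--         "__http_status__" => "__httpStatus__"
--     """
--     parts = name.split("_")
--     i = 0
--     while parts[i] == "":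
--         parts[i] = "_"
--         i += 1
--     parts[i] = parts[i].lower()
--     for j in range(i+1, len(parts)):
--         parts[j] = parts[j].capitalize()
--     i = len(parts) - 1
--     while parts[i] == "":
--         parts[i] = "_"
--         i -= 1
--     return "".join(parts)
-- ===== SOURCE B (Python) =====
-- def translate_name(name):
--     stripped = name.lstrip("_")
--     lead = len(name) - len(stripped)
--     core = stripped.rstrip("_")
--     trail = len(stripped) - len(core)
--     words = [w for w in core.split("_") if w]
--     first = words[0]  # IndexError when name has no non-underscore character, as in A
--     return ("_" * lead + first.lower()
--             + "".join(w.capitalize() for w in words[1:])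
--             + "_" * trail)
-- ===== Notes on version B (the rewrite author's own statement) =====
-- stated objective: alternative
-- what changed: A splits first and then mutates the parts list with two index-walking while-loops plus an in-place capitalize pass; B instead strips the edge underscore runs at character level (lstrip/rstrip), counts them, splits only the core and filters out empty pieces, assembling the result in one expression.
import Mathlib
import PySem

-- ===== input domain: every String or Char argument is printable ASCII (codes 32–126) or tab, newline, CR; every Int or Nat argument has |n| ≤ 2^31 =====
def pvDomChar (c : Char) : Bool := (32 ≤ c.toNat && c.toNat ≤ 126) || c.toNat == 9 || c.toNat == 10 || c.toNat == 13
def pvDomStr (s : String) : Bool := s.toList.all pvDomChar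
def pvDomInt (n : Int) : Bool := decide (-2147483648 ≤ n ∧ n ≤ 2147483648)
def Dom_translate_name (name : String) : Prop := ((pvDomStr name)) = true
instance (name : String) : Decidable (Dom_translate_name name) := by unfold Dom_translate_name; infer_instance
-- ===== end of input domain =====

-- B restructures A: instead of splitting first and patching the parts list with two index-walking
-- while-loops, B strips and counts the edge underscore runs at character level, splits only the core
-- and drops empty pieces; same return value on every input where A returns (Pre_ excludes the
-- all-underscore/empty names, on which both Pythons raise IndexError).

-- model of Python's str.capitalize (both A and B call it; ASCII-exact via PySem.Chars.upperChar/lower)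
def pyCapitalize (w : List Char) : List Char :=
  match w with
  | [] => []
  | c :: r => PySem.Chars.upperChar c :: PySem.Chars.lower r

-- ===== PORT A =====
-- A's leading while-loop + lower + capitalize pass, as structural recursion over the parts list;
-- none = the IndexError of 'parts[i]' when i runs past the end (all parts empty)
def fixLeadA : List (List Char) → Option (List (List Char))
  | [] => none
  | p :: rest =>
    if p = [] then (fixLeadA rest).map (fun r => ['_'] :: r)
    else some (PySem.Chars.lower p :: rest.map pyCapitalize)

-- A's trailing while-loop, run on the reversed parts list (it stops at the first nonempty part,
-- which always exists once fixLeadA has succeeded, so no negative-index wraparound can occur)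
def fixTrailA : List (List Char) → List (List Char)
  | [] => []
  | p :: rest => if p = [] then ['_'] :: fixTrailA rest else p :: rest

def translate_name (name : String) : String :=
  match fixLeadA (PySem.Chars.splitOn name.toList ['_']) with
  | none => ""   -- Python raises IndexError here; excluded by Pre_
  | some parts => String.ofList (PySem.Chars.join [] (fixTrailA parts.reverse).reverse)

-- ===== PORT B =====
def translate_name_alt (name : String) : String :=
  let cs := name.toList
  let stripped := cs.dropWhile (fun c => c == '_')                       -- name.lstrip("_"), exact hand port
  let lead : Nat := cs.length - stripped.length
  let core := (stripped.reverse.dropWhile (fun c => c == '_')).reverse   -- stripped.rstrip("_"), exact hand port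
  let trail : Nat := stripped.length - core.length
  let words := (PySem.Chars.splitOn core ['_']).filter (fun w => w ≠ [])
  match words with
  | [] => ""   -- words[0]: Python raises IndexError here; excluded by Pre_
  | w :: ws =>
      String.ofList (List.replicate lead '_' ++ PySem.Chars.lower w
        ++ PySem.Chars.join [] (ws.map pyCapitalize)
        ++ List.replicate trail '_')

-- ===== PRECONDITION & SPEC =====
-- Pre_ excludes exactly the names made only of underscores (including ""): there A's leading
-- while-loop runs past the end of the parts list and Python raises IndexError (B raises too).
def Pre_translate_name (name : String) : Prop := name.toList.any (fun c => c != '_') = true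
instance (name : String) : Decidable (Pre_translate_name name) := by unfold Pre_translate_name; infer_instance

def pvWitness_translate_name : String := "num_rows"

def Spec_translate_name (name : String) (out : String) : Prop := out = translate_name_alt name
instance (name : String) (out : String) : Decidable (Spec_translate_name name out) := by unfold Spec_translate_name; infer_instance

-- ===== CLAIM (what is proved, stated in full; the proofs are below) =====
def Claim_equal_translate_name : Prop := ∀ (name : String), Dom_translate_name name → Pre_translate_name name → Spec_translate_name name (translate_name name)

-- ===== LEMMAS AND PROOFS =====

-- reference recursion for Python's split("_") (accumulator = current piece)
def mySplit (pre : List Char) : List Char → List (List Char)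
  | [] => [pre]
  | c :: r => if c = '_' then pre :: mySplit [] r else mySplit (pre ++ [c]) r

theorem go_eq : ∀ (fuel : Nat) (l cur : List Char) (acc : List (List Char)),
    l.length < fuel →
    PySem.Chars.splitOn.go ['_'] fuel l cur acc = acc.reverse ++ mySplit cur.reverse l := by
  intro fuel
  induction fuel with
  | zero => intro l cur acc h; omega
  | succ n ih =>
    intro l cur acc h
    cases l with
    | nil => simp [PySem.Chars.splitOn.go, mySplit]
    | cons c rest =>
      rw [PySem.Chars.splitOn.go]
      by_cases hc : c = '_'
      · subst hc
        have hp : List.isPrefixOf ['_'] ('_' :: rest) = true := by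
          simp [List.isPrefixOf]
        simp only [hp, if_pos]
        rw [ih _ _ _ (by simp at h ⊢; omega)]
        simp [mySplit]
      · have hp : List.isPrefixOf ['_'] (c :: rest) = false := by
          simp [List.isPrefixOf]; exact fun h' => hc h'.symm
        simp only [hp]
        rw [if_neg (by simp)]
        rw [ih _ _ _ (by simp at h ⊢; omega)]
        simp [mySplit, hc]

theorem splitOn_eq (cs : List Char) : PySem.Chars.splitOn cs ['_'] = mySplit [] cs := by
  rw [PySem.Chars.splitOn, go_eq _ _ _ _ (by simp)]
  simp

theorem mySplit_lead (k : Nat) (rest : List Char) :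
    mySplit [] (List.replicate k '_' ++ rest) = List.replicate k [] ++ mySplit [] rest := by
  induction k with
  | zero => simp
  | succ n ih => simp [List.replicate_succ, mySplit, ih]

theorem mySplit_snoc (l : List Char) : ∀ pre, mySplit pre (l ++ ['_']) = mySplit pre l ++ [[]] := by
  induction l with
  | nil => intro pre; simp [mySplit]
  | cons c r ih =>
    intro pre
    by_cases hc : c = '_' <;> simp [mySplit, hc, ih]

theorem mySplit_trail (t : Nat) : ∀ (l pre : List Char),
    mySplit pre (l ++ List.replicate t '_') = mySplit pre l ++ List.replicate t [] := by
  induction t with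
  | zero => simp
  | succ n ih =>
    intro l pre
    have : l ++ List.replicate (n+1) '_' = (l ++ ['_']) ++ List.replicate n '_' := by
      simp [List.replicate_succ]
    rw [this, ih, mySplit_snoc]
    simp [List.replicate_succ]

theorem mySplit_head (l : List Char) : ∀ pre, ∃ w ws, mySplit pre l = (pre ++ w) :: ws := by
  induction l with
  | nil => intro pre; exact ⟨[], [], by simp [mySplit]⟩
  | cons c r ih =>
    intro pre
    by_cases hc : c = '_'
    · exact ⟨[], mySplit [] r, by simp [mySplit, hc]⟩
    · obtain ⟨w, ws, hw⟩ := ih (pre ++ [c])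
      exact ⟨[c] ++ w, ws, by simp [mySplit, hc, hw]⟩

theorem mySplit_last (l : List Char) : ∀ pre, l ≠ [] → l.getLast? ≠ some '_' →
    ∃ us u, mySplit pre l = us ++ [u] ∧ u ≠ [] := by
  induction l with
  | nil => intro pre h; exact absurd rfl h
  | cons c r ih =>
    intro pre _ hlast
    cases r with
    | nil =>
      have hc : c ≠ '_' := by simpa using hlast
      exact ⟨[], pre ++ [c], by simp [mySplit, hc], by simp⟩
    | cons d r' =>
      have hlast' : (d :: r').getLast? ≠ some '_' := by
        simpa [List.getLast?_cons_cons] using hlast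
      by_cases hc : c = '_'
      · obtain ⟨us, u, hu, hune⟩ := ih [] (by simp) hlast'
        exact ⟨pre :: us, u, by rw [mySplit, if_pos hc, hu]; rfl, hune⟩
      · obtain ⟨us, u, hu, hune⟩ := ih (pre ++ [c]) (by simp) hlast'
        exact ⟨us, u, by rw [mySplit, if_neg hc]; exact hu, hune⟩

theorem fixLeadA_lead (k : Nat) (p : List Char) (rest : List (List Char)) :
    fixLeadA (List.replicate k [] ++ (p :: rest)) =
      (fixLeadA (p :: rest)).map (fun r => List.replicate k ['_'] ++ r) := by
  induction k with
  | zero => cases h : fixLeadA (p :: rest) <;> simp [h]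
  | succ n ih =>
    rw [List.replicate_succ, List.cons_append]
    show fixLeadA ([] :: (List.replicate n [] ++ (p :: rest))) = _
    rw [fixLeadA, if_pos rfl, ih]
    cases h : fixLeadA (p :: rest) <;> simp [List.replicate_succ]

theorem fixTrailA_lead (t : Nat) (y : List Char) (rest : List (List Char)) (hy : y ≠ []) :
    fixTrailA (List.replicate t [] ++ y :: rest) = List.replicate t ['_'] ++ y :: rest := by
  induction t with
  | zero => simp [fixTrailA, hy]
  | succ n ih => simp [List.replicate_succ, fixTrailA, ih]

theorem flatten_map_cap_filter (ws : List (List Char)) :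
    ((ws.filter (fun w => w ≠ [])).map pyCapitalize).flatten = (ws.map pyCapitalize).flatten := by
  induction ws with
  | nil => simp
  | cons w ws ih =>
    simp only [ne_eq, decide_not] at ih
    by_cases hw : w = []
    · subst hw; simpa [pyCapitalize] using ih
    · simp only [List.filter_cons, decide_not, ne_eq, hw, decide_false, Bool.not_false,
        if_true, List.map_cons, List.flatten_cons, ih]

theorem join_nil_eq_flatten (parts : List (List Char)) :
    PySem.Chars.join [] parts = parts.flatten := by
  induction parts with
  | nil => simp [PySem.Chars.join, List.intercalate]
  | cons p ps ih =>
    cases ps with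
    | nil => simp [PySem.Chars.join, List.intercalate, List.intersperse]
    | cons q qs =>
      simp [PySem.Chars.join, List.intercalate, List.intersperse_cons₂] at ih ⊢
      simp [ih]

theorem strip_decomp (cs : List Char) (h : ∃ c ∈ cs, c ≠ '_') :
    ∃ k t core, cs = List.replicate k '_' ++ core ++ List.replicate t '_'
      ∧ core ≠ [] ∧ core.head? ≠ some '_' ∧ core.getLast? ≠ some '_'
      ∧ cs.dropWhile (fun c => c == '_') = core ++ List.replicate t '_'
      ∧ ((cs.dropWhile (fun c => c == '_')).reverse.dropWhile (fun c => c == '_')).reverse = core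
      ∧ k = cs.length - (cs.dropWhile (fun c => c == '_')).length
      ∧ t = (cs.dropWhile (fun c => c == '_')).length - core.length := by
  classical
  set p := fun c : Char => c == '_' with hp
  set d1 := cs.dropWhile p with hd1
  set core := (d1.reverse.dropWhile p).reverse with hcore
  have htk : cs.takeWhile p = List.replicate (cs.takeWhile p).length '_' := by
    rw [List.eq_replicate_iff]
    refine ⟨rfl, fun b hb => ?_⟩
    have hall := List.all_takeWhile (p := p) (l := cs)
    have := List.all_eq_true.mp hall b hb
    simpa [hp] using this
  have hsplit : cs = List.replicate (cs.takeWhile p).length '_' ++ d1 := by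
    conv_lhs => rw [← List.takeWhile_append_dropWhile (p := p) (l := cs)]
    rw [← htk, hd1]
  have htk2 : d1.reverse.takeWhile p = List.replicate (d1.reverse.takeWhile p).length '_' := by
    rw [List.eq_replicate_iff]
    refine ⟨rfl, fun b hb => ?_⟩
    have hall := List.all_takeWhile (p := p) (l := d1.reverse)
    have := List.all_eq_true.mp hall b hb
    simpa [hp] using this
  have hd1split : d1 = core ++ List.replicate (d1.reverse.takeWhile p).length '_' := by
    conv_lhs => rw [← List.reverse_reverse d1]
    conv_lhs => rw [← List.takeWhile_append_dropWhile (p := p) (l := d1.reverse)]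
    rw [List.reverse_append, htk2, List.reverse_replicate, hcore]
    simp
  have hcs : cs = List.replicate (cs.takeWhile p).length '_' ++ core ++ List.replicate (d1.reverse.takeWhile p).length '_' := by
    rw [List.append_assoc, ← hd1split, ← hsplit]
  have hcne : core ≠ [] := by
    obtain ⟨c0, hc0mem, hc0⟩ := h
    intro hnil
    rw [hcs, hnil] at hc0mem
    simp only [List.append_nil, List.mem_append, List.mem_replicate] at hc0mem
    rcases hc0mem with h' | h' <;> exact hc0 h'.2
  have hchead : core.head? ≠ some '_' := by
    have hne : d1.head? = core.head? := by
      rw [hd1split, List.head?_append]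
      cases hc : core.head? with
      | none => exact absurd (List.head?_eq_none_iff.mp hc) hcne
      | some x => simp
    have hh := List.head?_dropWhile_not p cs
    rw [← hd1] at hh
    intro hcontra
    rw [← hne] at hcontra
    rw [hcontra] at hh
    simp [hp] at hh
  have hclast : core.getLast? ≠ some '_' := by
    have : core.getLast? = (d1.reverse.dropWhile p).head? := by
      rw [← List.head?_reverse, hcore, List.reverse_reverse]
    have hh := List.head?_dropWhile_not p d1.reverse
    intro hcontra
    rw [this] at hcontra
    rw [hcontra] at hh
    simp [hp] at hh
  refine ⟨(cs.takeWhile p).length, (d1.reverse.takeWhile p).length, core, hcs, hcne, hchead, hclast, hd1split, rfl, ?_, ?_⟩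
  · have := congrArg List.length hsplit
    simp at this
    omega
  · have := congrArg List.length hd1split
    simp at this
    omega

-- ===== VERDICT (by name: the statement is the Claim_ definition above) =====
theorem cap_ne_nil (u : List Char) (hu : u ≠ []) : pyCapitalize u ≠ [] := by
  cases u with
  | nil => exact absurd rfl hu
  | cons a b => simp [pyCapitalize]

theorem lower_ne_nil (u : List Char) (hu : u ≠ []) : PySem.Chars.lower u ≠ [] := by
  cases u with
  | nil => exact absurd rfl hu
  | cons a b => simp [PySem.Chars.lower]

theorem translate_name_spec : Claim_equal_translate_name := by
  intro name _ hpre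
  unfold Spec_translate_name
  obtain ⟨k, t, core, hcs, hcne, hchead, hclast, hd1core, hcoreeq, hk, ht⟩ :=
    strip_decomp name.toList (by
      rw [Pre_translate_name, List.any_eq_true] at hpre
      obtain ⟨c, hc, hcc⟩ := hpre
      exact ⟨c, hc, by simpa using hcc⟩)
  -- the first character of core is not an underscore
  obtain ⟨c, r, rfl⟩ : ∃ c r, core = c :: r := by
    cases core with
    | nil => exact absurd rfl hcne
    | cons c r => exact ⟨c, r, rfl⟩
  have hc : c ≠ '_' := by intro h; exact hchead (by rw [h]; rfl)
  -- the words of core: the first word is nonempty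
  obtain ⟨w, ws, hw⟩ := mySplit_head r [c]
  have hwcore : mySplit [] (c :: r) = (c :: w) :: ws := by
    rw [mySplit, if_neg hc, List.nil_append, hw]; rfl
  have hw0ne : (c :: w) ≠ [] := by simp
  -- the last word of core is nonempty
  obtain ⟨us, u, hus, hune⟩ := mySplit_last (c :: r) [] hcne hclast
  -- A's parts list after split
  have hA_parts : PySem.Chars.splitOn name.toList ['_'] =
      List.replicate k [] ++ ((c :: w) :: (ws ++ List.replicate t [])) := by
    rw [splitOn_eq, hcs, List.append_assoc, mySplit_lead, mySplit_trail, hwcore]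
    simp
  -- A's parts after the leading fix-up, the lower and the capitalize pass
  have hfix : fixLeadA (PySem.Chars.splitOn name.toList ['_']) =
      some ((List.replicate k ['_'] ++ PySem.Chars.lower (c :: w) :: (ws.map pyCapitalize))
        ++ List.replicate t []) := by
    rw [hA_parts, fixLeadA_lead]
    rw [show fixLeadA ((c :: w) :: (ws ++ List.replicate t [])) =
        some (PySem.Chars.lower (c :: w) :: (ws ++ List.replicate t []).map pyCapitalize) from by
      rw [fixLeadA, if_neg hw0ne]]
    simp [pyCapitalize]
  -- that list ends in a nonempty piece
  obtain ⟨N, y, hM, hy⟩ : ∃ N y,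
      List.replicate k ['_'] ++ PySem.Chars.lower (c :: w) :: (ws.map pyCapitalize) = N ++ [y]
      ∧ y ≠ ([] : List Char) := by
    rcases List.eq_nil_or_concat ws with rfl | ⟨vs, v, rfl⟩
    · exact ⟨List.replicate k ['_'], PySem.Chars.lower (c :: w), by simp, lower_ne_nil _ hw0ne⟩
    · have hvu : v = u := by
        have h1 : ((c :: w) :: vs.concat v).getLast? = some v := by
          rw [List.concat_eq_append, show (c :: w) :: (vs ++ [v]) = ((c :: w) :: vs) ++ [v] from rfl,
            List.getLast?_concat]
        have h2 : (us ++ [u]).getLast? = some v := by rw [← hus, hwcore]; exact h1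
        rw [List.getLast?_concat] at h2
        exact (Option.some_inj.mp h2).symm
      exact ⟨List.replicate k ['_'] ++ PySem.Chars.lower (c :: w) :: vs.map pyCapitalize,
        pyCapitalize v, by simp, by rw [hvu]; exact cap_ne_nil u hune⟩
  -- A's trailing fix-up
  have htrail : (fixTrailA (((List.replicate k ['_'] ++ PySem.Chars.lower (c :: w) :: (ws.map pyCapitalize))
        ++ List.replicate t []).reverse)).reverse =
      (List.replicate k ['_'] ++ PySem.Chars.lower (c :: w) :: (ws.map pyCapitalize))
        ++ List.replicate t ['_'] := by
    rw [hM]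
    rw [show ((N ++ [y]) ++ List.replicate t ([] : List Char)).reverse
        = List.replicate t ([] : List Char) ++ y :: N.reverse from by
      simp [List.reverse_append, List.reverse_replicate]]
    rw [fixTrailA_lead t y N.reverse hy]
    simp [List.reverse_append, List.reverse_replicate]
  -- assemble both sides
  rw [translate_name, hfix]
  rw [translate_name_alt]
  simp only []
  rw [htrail]
  rw [hcoreeq, splitOn_eq, hwcore]
  rw [show List.filter (fun w => decide (w ≠ [])) ((c :: w) :: ws)
      = (c :: w) :: List.filter (fun w => decide (w ≠ [])) ws from by simp]
  rw [← hk, ← ht]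
  simp [join_nil_eq_flatten, List.flatten_append, List.append_assoc]
  rw [show (List.filter (fun w => !decide (w = [])) ws) = List.filter (fun w => decide (w ≠ [])) ws
    from by congr 1; funext x; simp, flatten_map_cap_filter]
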